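-- pv_equiv track=rewrite | github.com/urban/agent-skills-spec-pack | skills/write-approval-view/scripts/render_approval_view_html.py | partition_section_lines
-- ===== SOURCE A (Python) =====
-- def trim_blank_lines(lines: list[str]) -> list[str]:
--     start = 0
--     end = len(lines)
--     while start < end and not lines[start].strip():
--         start += 1
--     while end > start and not lines[end - 1].strip():
--         end -= 1
--     return lines[start:end]
--
-- def split_subsections(lines: list[str]) -> list[tuple[str | None, list[str]]]:
--     sections: list[tuple[str | None, list[str]]] = []
--     current_title: str | None = None
--     current_lines: list[str] = []
--
--     for line in lines:
--         if line.startswith("### "):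
--             sections.append((current_title, trim_blank_lines(current_lines)))
--             current_title = line[4:].strip()
--             current_lines = []
--         else:
--             current_lines.append(line)
--
--     sections.append((current_title, trim_blank_lines(current_lines)))
--     return [(title, chunk) for title, chunk in sections if title is not None or chunk]
--
-- def partition_section_lines(lines: list[str]) -> tuple[list[str], list[tuple[str, list[str]]], list[str]]:
--     main_lines: list[str] = []
--     extra_subsections: list[tuple[str, list[str]]] = []
--     visual_lines: list[str] = []
--
--     for title, chunk in split_subsections(lines):
--         if title is None:
--             main_lines.extend(chunk)
--         elif title == "Visual Evidence":
--             visual_lines.extend(chunk)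
--         else:
--             extra_subsections.append((title, chunk))
--
--     return trim_blank_lines(main_lines), extra_subsections, trim_blank_lines(visual_lines)
-- ===== SOURCE B (Python) =====
-- def partition_section_lines(lines: list[str]) -> tuple[list[str], list[tuple[str, list[str]]], list[str]]:
--     # Reverse pass: walk the lines back-to-front, closing each chunk at its '### '
--     # header and building the three results back-to-front.
--     def _trim(chunk: list[str]) -> list[str]:
--         while chunk and not chunk[0].strip():
--             chunk = chunk[1:]
--         while chunk and not chunk[-1].strip():
--             chunk = chunk[:-1]
--         return chunk
--
--     extras: list[tuple[str, list[str]]] = []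
--     visual: list[str] = []
--     buf: list[str] = []
--     for line in reversed(lines):
--         if line.startswith("### "):
--             title = line[4:].strip()
--             chunk = _trim(buf[::-1])
--             buf = []
--             if title == "Visual Evidence":
--                 visual = chunk + visual
--             else:
--                 extras.insert(0, (title, chunk))
--         else:
--             buf.append(line)
--     return _trim(buf[::-1]), extras, _trim(visual)
-- ===== Notes on version B (the rewrite author's own statement) =====
-- stated objective: alternative
-- what changed: B traverses the lines in REVERSE and builds the result back-to-front: each '### ' header closes the chunk accumulated since the later header, routing it by prepending to visual or inserting at the front of extras, and chunks are trimmed by repeatedly slicing blank lines off the ends instead of A's start/end index while-loops over an intermediate subsections list.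
import Mathlib
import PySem

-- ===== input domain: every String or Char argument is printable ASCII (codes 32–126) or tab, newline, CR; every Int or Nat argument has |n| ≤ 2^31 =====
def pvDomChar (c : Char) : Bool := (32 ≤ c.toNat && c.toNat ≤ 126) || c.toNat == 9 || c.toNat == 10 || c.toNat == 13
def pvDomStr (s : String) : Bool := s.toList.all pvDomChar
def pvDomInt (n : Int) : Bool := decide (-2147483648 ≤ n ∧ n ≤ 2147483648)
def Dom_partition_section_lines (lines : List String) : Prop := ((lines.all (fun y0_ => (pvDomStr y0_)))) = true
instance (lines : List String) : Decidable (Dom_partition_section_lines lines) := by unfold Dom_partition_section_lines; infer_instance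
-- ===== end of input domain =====

-- B traverses the lines in reverse, building all three results back-to-front (prepending),
-- and trims blank edges by repeatedly slicing blank lines off the ends; same return value.

-- ===== PORT A =====

-- 'not line.strip()' (the blank-line test of trim_blank_lines)
def pvBlank (s : String) : Bool := PySem.Str.strip s == ""

-- 'while start < end and not lines[start].strip(): start += 1'
-- (lines[start] is always in range here, so getD is exact)
def pvTblStart (lines : List String) (e start : Nat) : Nat :=
  if start < e ∧ pvBlank (lines.getD start "") then pvTblStart lines e (start + 1) else start
termination_by e - start
decreasing_by omega

-- 'while end > start and not lines[end - 1].strip(): end -= 1'  (lines[end-1] always in range)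
def pvTblEnd (lines : List String) (start e : Nat) : Nat :=
  if start < e ∧ pvBlank (lines.getD (e - 1) "") then pvTblEnd lines start (e - 1) else e
termination_by e
decreasing_by omega

def trim_blank_lines (lines : List String) : List String :=
  let s := pvTblStart lines lines.length 0
  let e := pvTblEnd lines s lines.length
  PySem.List.slice lines (some (s : Int)) (some (e : Int))

-- the loop body of split_subsections; state = (sections, current_title, current_lines)
def pvSplitStep (st : List (Option String × List String) × Option String × List String)
    (line : String) : List (Option String × List String) × Option String × List String :=
  if PySem.Str.startswith line "### " then
    (st.1 ++ [(st.2.1, trim_blank_lines st.2.2)],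
     some (PySem.Str.strip (PySem.Str.slice line (some 4) none)), [])
  else
    (st.1, st.2.1, st.2.2 ++ [line])

def split_subsections (lines : List String) : List (Option String × List String) :=
  let st := lines.foldl pvSplitStep ([], none, [])
  let sections := st.1 ++ [(st.2.1, trim_blank_lines st.2.2)]
  sections.filter (fun tc => tc.1.isSome || !tc.2.isEmpty)

-- the loop body of partition_section_lines; state = (main_lines, extra_subsections, visual_lines)
def pvRouteStep (st : List String × List (String × List String) × List String)
    (tc : Option String × List String) :
    List String × List (String × List String) × List String :=
  match tc.1 with
  | none => (st.1 ++ tc.2, st.2.1, st.2.2)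
  | some t =>
      if t == "Visual Evidence" then (st.1, st.2.1, st.2.2 ++ tc.2)
      else (st.1, st.2.1 ++ [(t, tc.2)], st.2.2)

def partition_section_lines (lines : List String) :
    List String × (List (String × List String)) × List String :=
  let st := (split_subsections lines).foldl pvRouteStep ([], [], [])
  (trim_blank_lines st.1, st.2.1, trim_blank_lines st.2.2)

-- ===== PORT B =====

-- 'while chunk and not chunk[0].strip(): chunk = chunk[1:]'
def pvTrimFront : List String → List String
  | [] => []
  | x :: xs => if PySem.Str.strip x == "" then pvTrimFront xs else x :: xs

-- 'while chunk and not chunk[-1].strip(): chunk = chunk[:-1]'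
def pvTrimBack (l : List String) : List String :=
  if l ≠ [] ∧ PySem.Str.strip (l.getLast?.getD "") == "" then pvTrimBack l.dropLast else l
termination_by l.length
decreasing_by
  rename_i h
  have := List.length_pos_of_ne_nil h.1
  simp [List.length_dropLast]; omega

-- B's _trim
def pvTrimBLines (chunk : List String) : List String := pvTrimBack (pvTrimFront chunk)

-- B's loop body on reversed(lines); state = (extras, visual, buf)  (buf in reverse text order)
def pvRevStep (st : List (String × List String) × List String × List String) (line : String) :
    List (String × List String) × List String × List String :=
  if PySem.Str.startswith line "### " then
    let title := PySem.Str.strip (PySem.Str.slice line (some 4) none)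
    let chunk := pvTrimBLines st.2.2.reverse
    if title == "Visual Evidence" then (st.1, chunk ++ st.2.1, [])
    else ((title, chunk) :: st.1, st.2.1, [])
  else (st.1, st.2.1, st.2.2 ++ [line])

def partition_section_lines_alt (lines : List String) :
    List String × (List (String × List String)) × List String :=
  let st := lines.reverse.foldl pvRevStep ([], [], [])
  (pvTrimBLines st.2.2.reverse, st.1, pvTrimBLines st.2.1)

-- ===== PRECONDITION & SPEC =====
def Spec_partition_section_lines (lines : List String) (out : List String × (List (String × List String)) × List String) : Prop := out = partition_section_lines_alt lines
instance (lines : List String) (out : List String × (List (String × List String)) × List String) : Decidable (Spec_partition_section_lines lines out) := by unfold Spec_partition_section_lines; infer_instance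

-- ===== CLAIM (what is proved, stated in full; the proofs are below) =====
def Claim_equal_partition_section_lines : Prop := ∀ (lines : List String), Dom_partition_section_lines lines → Spec_partition_section_lines lines (partition_section_lines lines)

-- ===== LEMMAS AND PROOFS =====

-- proof-level bridge: trim by dropWhile on the list and on its reverse
def pvD (l : List String) : List String := l.dropWhile (fun s => PySem.Str.strip s == "")
def pvTrimB (l : List String) : List String := (pvD (pvD l).reverse).reverse

theorem pvTrimFront_eq (l : List String) : pvTrimFront l = pvD l := by
  induction l with
  | nil => rfl
  | cons a t ih => by_cases h : PySem.Str.strip a == "" <;> simp [pvTrimFront, pvD, h] at * <;> simpa [pvD] using ih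

theorem pvTrimBack_eq (l : List String) : pvTrimBack l = (pvD l.reverse).reverse := by
  fun_induction pvTrimBack l with
  | case1 l h ih =>
    obtain ⟨hne, hb⟩ := h
    rw [ih]
    have hlast := List.getLast?_eq_some_getLast (l := l) hne
    rw [hlast] at hb
    simp only [Option.getD_some] at hb
    have hsplit : l = l.dropLast ++ [l.getLast hne] := (List.dropLast_append_getLast hne).symm
    have : l.reverse = l.getLast hne :: l.dropLast.reverse := by
      conv_lhs => rw [hsplit]
      simp
    rw [this]
    simp [pvD, hb]
  | case2 l h =>
    rcases eq_or_ne l [] with rfl | hne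
    · rfl
    · have hb : (PySem.Str.strip (l.getLast?.getD "") == "") = false := by
        by_contra hc
        exact h ⟨hne, by simpa using hc⟩
      have hlast := List.getLast?_eq_some_getLast (l := l) hne
      rw [hlast] at hb
      simp only [Option.getD_some] at hb
      have hsplit : l = l.dropLast ++ [l.getLast hne] := (List.dropLast_append_getLast hne).symm
      have hrev : l.reverse = l.getLast hne :: l.dropLast.reverse := by
        conv_lhs => rw [hsplit]
        simp
      simp only [pvD]
      rw [hrev, List.dropWhile_cons, if_neg (by simp [hb]), ← hrev, List.reverse_reverse]

theorem pvTrimBLines_eq (l : List String) : pvTrimBLines l = pvTrimB l := by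
  rw [pvTrimBLines, pvTrimFront_eq, pvTrimBack_eq, pvTrimB]

-- dropWhile as a drop by the takeWhile length (used to align the trims with A's index arithmetic)
theorem pvDropWhile_eq_drop (p : String → Bool) (l : List String) :
    l.dropWhile p = l.drop (l.takeWhile p).length := by
  induction l with
  | nil => simp
  | cons a t ih => by_cases h : p a <;> simp [h, ih]

theorem pvTblStart_eq (l : List String) (k : Nat) (hk : k ≤ l.length) :
    pvTblStart l l.length k = k + ((l.drop k).takeWhile pvBlank).length := by
  fun_induction pvTblStart l l.length k with
  | case1 start h ih =>
    have hlt : start < l.length := h.1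
    have hd : l.drop start = l[start] :: l.drop (start + 1) :=
      List.drop_eq_getElem_cons hlt
    have hb : pvBlank l[start] = true := by
      have := h.2; rwa [List.getD_eq_getElem l "" hlt] at this
    rw [ih (by omega), hd, List.takeWhile_cons, hb]
    simp; omega
  | case2 start h =>
    rcases Nat.lt_or_ge start l.length with hlt | hge
    · have hb : pvBlank (l.getD start "") = false := by
        by_contra hcon
        exact h ⟨hlt, by simpa using hcon⟩
      rw [List.getD_eq_getElem l "" hlt] at hb
      rw [List.drop_eq_getElem_cons hlt, List.takeWhile_cons, hb]
      simp
    · have : l.drop start = [] := List.drop_eq_nil_of_le hge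
      simp [this]

theorem pvTblEnd_eq (l : List String) (s e : Nat) (hs : s ≤ e) (he : e ≤ l.length) :
    pvTblEnd l s e = e - (((l.take e).drop s).reverse.takeWhile pvBlank).length := by
  fun_induction pvTblEnd l s e with
  | case1 e h ih =>
    have hse : s < e := h.1
    have hel : e - 1 < l.length := by omega
    have hb : pvBlank l[e - 1] = true := by
      have := h.2; rwa [List.getD_eq_getElem l "" hel] at this
    have htake : l.take e = l.take (e - 1) ++ [l[e - 1]] := by
      have : e = (e - 1) + 1 := by omega
      conv_lhs => rw [this]
      rw [List.take_add_one, List.getElem?_eq_getElem hel]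
      simp
    have hdrop : (l.take e).drop s = (l.take (e - 1)).drop s ++ [l[e - 1]] := by
      rw [htake, List.drop_append_of_le_length]
      simp; omega
    have hlen : (((l.take (e - 1)).drop s).reverse.takeWhile pvBlank).length ≤ e - 1 - s := by
      calc (((l.take (e - 1)).drop s).reverse.takeWhile pvBlank).length
          ≤ ((l.take (e - 1)).drop s).reverse.length := (List.takeWhile_prefix _).length_le
        _ ≤ e - 1 - s := by simp; omega
    rw [ih (by omega) (by omega), hdrop]
    simp only [List.reverse_append, List.reverse_cons, List.reverse_nil, List.nil_append,
      List.singleton_append, List.takeWhile_cons, hb]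
    simp only [if_true, List.length_cons]
    omega
  | case2 e h =>
    rcases Nat.lt_or_ge s e with hse | hse
    · have hel : e - 1 < l.length := by omega
      have hb : pvBlank (l.getD (e - 1) "") = false := by
        by_contra hcon
        exact h ⟨hse, by simpa using hcon⟩
      rw [List.getD_eq_getElem l "" hel] at hb
      have htake : l.take e = l.take (e - 1) ++ [l[e - 1]] := by
        have : e = (e - 1) + 1 := by omega
        conv_lhs => rw [this]
        rw [List.take_add_one, List.getElem?_eq_getElem hel]
        simp
      have hdrop : (l.take e).drop s = (l.take (e - 1)).drop s ++ [l[e - 1]] := by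
        rw [htake, List.drop_append_of_le_length]
        simp; omega
      rw [hdrop]
      simp [hb]
    · have : (l.take e).drop s = [] := by
        apply List.drop_eq_nil_of_le
        simp; omega
      simp [this]

theorem pvTrim_eq (l : List String) : trim_blank_lines l = pvTrimB l := by
  have hc : (l.takeWhile pvBlank).length ≤ l.length := (List.takeWhile_prefix _).length_le
  set c := (l.takeWhile pvBlank).length with hcdef
  set m := l.drop c with hmdef
  have hml : m.length = l.length - c := by simp [hmdef]
  set k := (m.reverse.takeWhile pvBlank).length with hkdef
  have hk : k ≤ l.length - c := by
    calc k ≤ m.reverse.length := (List.takeWhile_prefix _).length_le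
      _ = l.length - c := by simp [hml]
  have hs : pvTblStart l l.length 0 = c := by
    simpa using pvTblStart_eq l 0 (by omega)
  have he : pvTblEnd l c l.length = l.length - k := by
    have := pvTblEnd_eq l c l.length hc le_rfl
    rwa [List.take_length] at this
  have hA : trim_blank_lines l = m.take (m.length - k) := by
    rw [trim_blank_lines]
    simp only [hs, he]
    rw [PySem.List.slice_natCast]
    rw [← hmdef, hml]
    congr 1
    omega
  have hB : pvTrimB l = m.take (m.length - k) := by
    rw [pvTrimB, pvD, pvD]
    have h1 : l.dropWhile (fun ln => PySem.Str.strip ln == "") = m := by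
      rw [show (fun ln => PySem.Str.strip ln == "") = pvBlank from rfl]
      rw [pvDropWhile_eq_drop, ← hcdef, ← hmdef]
    rw [h1]
    rw [show (fun ln => PySem.Str.strip ln == "") = pvBlank from rfl]
    rw [pvDropWhile_eq_drop, ← hkdef]
    rw [List.reverse_drop]
    simp [hml]
  rw [hA, hB]

-- the head of a nonempty dropWhile result fails the predicate
theorem pvD_head (l : List String) (y : String) (ys : List String) (h : pvD l = y :: ys) :
    (PySem.Str.strip y == "") = false := by
  induction l with
  | nil => simp [pvD] at h
  | cons a t ih =>
    by_cases hb : (PySem.Str.strip a == "") = true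
    · rw [pvD, List.dropWhile_cons, if_pos hb] at h
      exact ih h
    · rw [pvD, List.dropWhile_cons, if_neg hb] at h
      cases h
      simpa using hb

theorem pvTrimB_idem (l : List String) : pvTrimB (pvTrimB l) = pvTrimB l := by
  rcases hcr : pvD (pvD l).reverse with _ | ⟨y', ys'⟩
  · have h0 : pvTrimB l = [] := by rw [pvTrimB, hcr]; rfl
    rw [h0]; rfl
  · have hresdef : pvTrimB l = (y' :: ys').reverse := by rw [pvTrimB, hcr]
    obtain ⟨t, ht⟩ : pvD (pvD l).reverse <:+ (pvD l).reverse := List.dropWhile_suffix _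
    rw [hcr] at ht
    have hmr : pvD l = (y' :: ys').reverse ++ t.reverse := by
      have := congrArg List.reverse ht
      simpa using this.symm
    rcases hrr : (y' :: ys').reverse with _ | ⟨z, zs⟩
    · exact absurd (congrArg List.length hrr) (by simp)
    · have hz : (PySem.Str.strip z == "") = false :=
        pvD_head l z (zs ++ t.reverse) (by rw [hmr, hrr]; rfl)
      have hy' : (PySem.Str.strip y' == "") = false :=
        pvD_head (pvD l).reverse y' ys' hcr
      have h1 : pvD (pvTrimB l) = pvTrimB l := by
        rw [hresdef, hrr, pvD, List.dropWhile_cons, if_neg (by simp [hz]), ← hrr]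
      rw [pvTrimB, h1, hresdef, List.reverse_reverse]
      rw [pvD, List.dropWhile_cons, if_neg (by simp [hy'])]

-- header / title abbreviations and the chunk decomposition both ports compute
def pvHeader (l : String) : Bool := PySem.Str.startswith l "### "
def pvTitle (l : String) : String := PySem.Str.strip (PySem.Str.slice l (some 4) none)

def pvChunks : List String → List String × List (String × List String)
  | [] => ([], [])
  | l :: rest =>
    let p := pvChunks rest
    if pvHeader l then ([], (pvTitle l, p.1) :: p.2) else (l :: p.1, p.2)

def pvE : List (String × List String) → List (String × List String)
  | [] => []
  | (t, c) :: sc => if t == "Visual Evidence" then pvE sc else (t, trim_blank_lines c) :: pvE sc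

def pvV : List (String × List String) → List String
  | [] => []
  | (t, c) :: sc => if t == "Visual Evidence" then trim_blank_lines c ++ pvV sc else pvV sc

-- === B-side characterization ===
theorem pvTrimBLines_trim (x : List String) : pvTrimBLines x = trim_blank_lines x := by
  rw [pvTrimBLines_eq, ← pvTrim_eq]

theorem pvB_foldr (lines : List String) :
    lines.reverse.foldl pvRevStep ([], [], []) =
      (pvE (pvChunks lines).2, pvV (pvChunks lines).2, (pvChunks lines).1.reverse) := by
  rw [List.foldl_reverse]
  induction lines with
  | nil => rfl
  | cons l rest ih =>
    simp only [List.foldr_cons, ih]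
    by_cases h : PySem.Str.startswith l "### " = true
    · have h' : PySem.Chars.startswith l.toList ['#', '#', '#', ' '] = true := by simpa using h
      by_cases hv : PySem.Str.strip (PySem.Str.slice l (some 4) none) = "Visual Evidence"
      · simp [pvRevStep, h', hv, pvChunks, pvHeader, pvTitle, pvE, pvV, pvTrimBLines_trim]
      · simp [pvRevStep, h', hv, pvChunks, pvHeader, pvTitle, pvE, pvV, pvTrimBLines_trim]
    · have h' : ¬ PySem.Chars.startswith l.toList ['#', '#', '#', ' '] = true := by simpa using h
      simp [pvRevStep, h', pvChunks, pvHeader]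

-- === A-side characterization ===
def pvG : Option String → List String → List String → List (Option String × List String)
  | title, buf, [] => [(title, trim_blank_lines buf)]
  | title, buf, l :: rest =>
    if pvHeader l then (title, trim_blank_lines buf) :: pvG (some (pvTitle l)) [] rest
    else pvG title (buf ++ [l]) rest

theorem pvA_split (lines : List String) (secs : List (Option String × List String))
    (title : Option String) (buf : List String) :
    (lines.foldl pvSplitStep (secs, title, buf)).1
      ++ [((lines.foldl pvSplitStep (secs, title, buf)).2.1,
           trim_blank_lines (lines.foldl pvSplitStep (secs, title, buf)).2.2)]
      = secs ++ pvG title buf lines := by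
  induction lines generalizing secs title buf with
  | nil => rfl
  | cons l rest ih =>
    by_cases h : PySem.Str.startswith l "### " = true
    · have h' : PySem.Chars.startswith l.toList ['#', '#', '#', ' '] = true := by simpa using h
      rw [List.foldl_cons, show pvSplitStep (secs, title, buf) l
          = (secs ++ [(title, trim_blank_lines buf)],
             some (PySem.Str.strip (PySem.Str.slice l (some 4) none)), []) from by
            simp [pvSplitStep, h']]
      rw [ih, pvG, if_pos (show pvHeader l = true from h)]
      simp [pvTitle]
    · have h' : ¬ PySem.Chars.startswith l.toList ['#', '#', '#', ' '] = true := by simpa using h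
      rw [List.foldl_cons, show pvSplitStep (secs, title, buf) l
          = (secs, title, buf ++ [l]) from by simp [pvSplitStep, h']]
      rw [ih, pvG, if_neg (show ¬ pvHeader l = true from h)]

theorem pvG_chunks (lines : List String) (title : Option String) (buf : List String) :
    pvG title buf lines
      = (title, trim_blank_lines (buf ++ (pvChunks lines).1))
          :: (pvChunks lines).2.map (fun tc => (some tc.1, trim_blank_lines tc.2)) := by
  induction lines generalizing title buf with
  | nil => simp [pvG, pvChunks]
  | cons l rest ih =>
    by_cases h : pvHeader l = true
    · rw [pvG, if_pos h, ih]
      simp [pvChunks, h]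
    · rw [pvG, if_neg h, ih]
      simp [pvChunks, h]

theorem pvRoute_mapped (sc : List (String × List String))
    (m : List String) (e : List (String × List String)) (v : List String) :
    (sc.map (fun tc => ((some tc.1 : Option String), trim_blank_lines tc.2))).foldl
        pvRouteStep (m, e, v)
      = (m, e ++ pvE sc, v ++ pvV sc) := by
  induction sc generalizing e v with
  | nil => simp [pvE, pvV]
  | cons tc sc' ih =>
    obtain ⟨t, c⟩ := tc
    by_cases hv : (t == "Visual Evidence") = true
    · rw [List.map_cons, List.foldl_cons,
        show pvRouteStep (m, e, v) (some t, trim_blank_lines c)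
          = (m, e, v ++ trim_blank_lines c) from by rw [pvRouteStep]; simp [hv]]
      rw [ih]
      simp [pvE, pvV, hv]
    · rw [List.map_cons, List.foldl_cons,
        show pvRouteStep (m, e, v) (some t, trim_blank_lines c)
          = (m, e ++ [(t, trim_blank_lines c)], v) from by rw [pvRouteStep]; simp [hv]]
      rw [ih]
      simp [pvE, pvV, hv]

theorem pvFoldl_filter (l : List (Option String × List String))
    (init : List String × List (String × List String) × List String) :
    (l.filter (fun tc => tc.1.isSome || !tc.2.isEmpty)).foldl pvRouteStep init
      = l.foldl pvRouteStep init := by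
  induction l generalizing init with
  | nil => rfl
  | cons tc rest ih =>
    by_cases h : (tc.1.isSome || !tc.2.isEmpty) = true
    · rw [List.filter_cons, if_pos h, List.foldl_cons, List.foldl_cons, ih]
    · have h1 : tc.1 = none := by
        cases htc : tc.1 <;> simp [htc] at h ⊢
      have h2 : tc.2 = [] := by
        cases htc : tc.2 with
        | nil => rfl
        | cons a t => simp [htc] at h
      have hstep : pvRouteStep init tc = init := by
        obtain ⟨t1, t2⟩ := tc
        cases h1; cases h2
        simp [pvRouteStep]
      rw [List.filter_cons, if_neg h, ih, List.foldl_cons, hstep]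

theorem pvA_char (lines : List String) :
    partition_section_lines lines
      = (trim_blank_lines (trim_blank_lines (pvChunks lines).1),
         pvE (pvChunks lines).2,
         trim_blank_lines (pvV (pvChunks lines).2)) := by
  rw [partition_section_lines]
  simp only [split_subsections]
  rw [pvFoldl_filter]
  have hsec := pvA_split lines [] none []
  rw [List.nil_append] at hsec
  have : (lines.foldl pvSplitStep ([], none, [])).1
      ++ [((lines.foldl pvSplitStep ([], none, [])).2.1,
           trim_blank_lines (lines.foldl pvSplitStep ([], none, [])).2.2)]
      = pvG none [] lines := hsec
  rw [this, pvG_chunks, List.nil_append, List.foldl_cons,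
    show pvRouteStep ([], [], []) ((none : Option String), trim_blank_lines (pvChunks lines).1)
      = (trim_blank_lines (pvChunks lines).1, [], []) from by rw [pvRouteStep]; simp]
  rw [pvRoute_mapped]
  simp

-- ===== VERDICT (by name: the statement is the Claim_ definition above) =====
theorem partition_section_lines_spec : Claim_equal_partition_section_lines := by
  intro lines _
  unfold Spec_partition_section_lines
  rw [pvA_char, partition_section_lines_alt]
  simp only [pvB_foldr]
  rw [List.reverse_reverse, pvTrimBLines_eq, pvTrimBLines_eq, ← pvTrim_eq, ← pvTrim_eq]
  rw [pvTrim_eq (pvChunks lines).1, pvTrim_eq, pvTrimB_idem, ← pvTrim_eq]
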